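-- pv_equiv track=rewrite | github.com/pypi-data/pypi-mirror-95 | packages/serializejson/serializejson-0.2.0-py3-none-any.whl/SmartFramework/tools/dictionaries.py | sorted_filtered
-- ===== SOURCE A (Python) =====
-- def sorted_filtered(dictionary, filter_str="_"):
--     # dectecte un attribut a cacher => recopie le dictionary sans prendre les attributs commencant pas '_'
--     if filter_str is True:
--         filter_str = "_"
--     elif not filter_str:
--         last_key = None
--         for key in dictionary:
--             if last_key is None:
--                 last_key = key
--             if last_key > key:
--                 break
--             last_key = key
--         else:
--             return dictionary
--         # le dictionnaire n'est pas dans l'ordre -> il faut le recopier en le triant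
--         return {key: dictionary[key] for key in sorted(dictionary)}
--     last_key = None
--     for key in dictionary:
--         if key.startswith(filter_str):
--             break
--         if last_key is None:
--             last_key = key
--         if last_key > key:
--             break
--         last_key = key
--     else:
--         return dictionary
--     return {key: dictionary[key] for key in sorted(dictionary) if not key.startswith(filter_str)}
-- ===== SOURCE B (Python) =====
-- def sorted_filtered(dictionary, filter_str="_"):
--     # Same result via explicit predicates (order check + clean check) instead of the incremental early-exit scan.
--     if filter_str is True:
--         filter_str = "_"
--     keys = list(dictionary)
--     in_order = keys == sorted(keys)
--     if not filter_str:
--         if in_order: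
--             return dictionary
--         return {key: dictionary[key] for key in sorted(keys)}
--     clean = not any(key.startswith(filter_str) for key in keys)
--     if clean and in_order:
--         return dictionary
--     return {key: dictionary[key] for key in sorted(keys) if not key.startswith(filter_str)}
-- ===== Notes on version B (the rewrite author's own statement) =====
-- stated objective: simpler
-- what changed: Replaces A's two incremental early-exit scans carrying a last_key accumulator with declarative predicates: in_order = keys == sorted(keys) and clean = not any(startswith), then a single branch per filter case.
import Mathlib
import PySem

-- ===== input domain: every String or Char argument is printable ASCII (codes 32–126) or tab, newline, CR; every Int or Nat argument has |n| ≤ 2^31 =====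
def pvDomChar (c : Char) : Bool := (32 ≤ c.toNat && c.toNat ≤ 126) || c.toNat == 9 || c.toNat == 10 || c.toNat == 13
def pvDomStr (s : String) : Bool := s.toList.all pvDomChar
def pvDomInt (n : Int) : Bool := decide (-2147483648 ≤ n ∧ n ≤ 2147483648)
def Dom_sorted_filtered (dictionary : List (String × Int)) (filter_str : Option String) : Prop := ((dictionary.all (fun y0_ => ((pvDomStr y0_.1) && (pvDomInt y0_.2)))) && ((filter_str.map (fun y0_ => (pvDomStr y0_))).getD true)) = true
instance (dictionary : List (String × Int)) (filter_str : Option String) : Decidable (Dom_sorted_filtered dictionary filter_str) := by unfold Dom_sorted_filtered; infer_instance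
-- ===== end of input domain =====

-- B replaces A's incremental early-exit scans by explicit order/clean predicates ("simpler"); same results, same cost.

-- dictionary[key]; the key always comes from the dictionary itself, so the none case is unreachable
def pyLookup (d : List (String × Int)) (k : String) : Int :=
  match d.find? (fun p => p.1 == k) with
  | some p => p.2
  | none => 0

-- {key: dictionary[key] for key in keys} (PySem.Dict: overwrite keeps position, new keys append)
def buildDict (d : List (String × Int)) (keys : List String) : List (String × Int) :=
  (keys.foldl (fun acc k => PySem.Dict.insert acc k (pyLookup d k)) PySem.Dict.empty).items

-- ===== PORT A =====
-- A's falsy-filter loop: for key in dictionary: … (for/else; returns true iff the loop completes without break)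
def loopNoFilter : Option String → List String → Bool
  | _, [] => true
  | last, k :: ks =>
    let l := match last with | none => k | some x => x
    if l > k then false else loopNoFilter (some k) ks

-- A's filtering loop: breaks on a prefixed key or an order violation
def loopFilter (fs : String) : Option String → List String → Bool
  | _, [] => true
  | last, k :: ks =>
    if PySem.Str.startswith k fs then false
    else
      let l := match last with | none => k | some x => x
      if l > k then false else loopFilter fs (some k) ks

def sorted_filtered (dictionary : List (String × Int)) (filter_str : Option String) : List (String × Int) :=
  let keys := dictionary.map Prod.fst
  match filter_str with
  | none =>
    if loopNoFilter none keys then dictionary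
    else buildDict dictionary (PySem.List.sorted keys (fun x => x) false)
  | some fs =>
    if fs = "" then
      if loopNoFilter none keys then dictionary
      else buildDict dictionary (PySem.List.sorted keys (fun x => x) false)
    else
      if loopFilter fs none keys then dictionary
      else buildDict dictionary ((PySem.List.sorted keys (fun x => x) false).filter
            (fun k => !PySem.Str.startswith k fs))

-- ===== PORT B =====
def sorted_filtered_alt (dictionary : List (String × Int)) (filter_str : Option String) : List (String × Int) :=
  let keys := dictionary.map Prod.fst
  let inOrder := keys = PySem.List.sorted keys (fun x => x) false
  match filter_str with
  | none =>
    if inOrder then dictionary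
    else buildDict dictionary (PySem.List.sorted keys (fun x => x) false)
  | some fs =>
    if fs = "" then
      if inOrder then dictionary
      else buildDict dictionary (PySem.List.sorted keys (fun x => x) false)
    else
      let clean := keys.all (fun k => !PySem.Str.startswith k fs)
      if clean ∧ inOrder then dictionary
      else buildDict dictionary ((PySem.List.sorted keys (fun x => x) false).filter
            (fun k => !PySem.Str.startswith k fs))

-- ===== PRECONDITION & SPEC =====
def Spec_sorted_filtered (dictionary : List (String × Int)) (filter_str : Option String) (out : List (String × Int)) : Prop := out = sorted_filtered_alt dictionary filter_str
instance (dictionary : List (String × Int)) (filter_str : Option String) (out : List (String × Int)) : Decidable (Spec_sorted_filtered dictionary filter_str out) := by unfold Spec_sorted_filtered; infer_instance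

-- ===== CLAIM (what is proved, stated in full; the proofs are below) =====
def Claim_equal_sorted_filtered : Prop := ∀ (dictionary : List (String × Int)) (filter_str : Option String), Dom_sorted_filtered dictionary filter_str → Spec_sorted_filtered dictionary filter_str (sorted_filtered dictionary filter_str)

-- ===== LEMMAS AND PROOFS =====

theorem loopNoFilter_some_iff (ks : List String) : ∀ a, loopNoFilter (some a) ks = true ↔ List.IsChain (· ≤ ·) (a :: ks) := by
  induction ks with
  | nil => intro a; simp [loopNoFilter, List.IsChain.singleton a]
  | cons k ks ih =>
    intro a
    have hred : loopNoFilter (some a) (k :: ks) = if a > k then false else loopNoFilter (some k) ks := rfl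
    by_cases h : a > k
    · rw [hred, if_pos h]
      simp only [Bool.false_eq_true, false_iff]
      intro hc
      exact absurd (List.isChain_cons_cons.mp hc).1 (not_le.mpr h)
    · rw [hred, if_neg h, ih k, List.isChain_cons_cons]
      exact ⟨fun hc => ⟨not_lt.mp h, hc⟩, fun hc => hc.2⟩

theorem loopNoFilter_iff (ks : List String) : loopNoFilter none ks = true ↔ List.IsChain (· ≤ ·) ks := by
  cases ks with
  | nil => simp [loopNoFilter]
  | cons k ks =>
    have hred : loopNoFilter none (k :: ks) = if k > k then false else loopNoFilter (some k) ks := rfl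
    rw [hred, if_neg (lt_irrefl k), loopNoFilter_some_iff ks k]

theorem loopFilter_some_iff (fs : String) (ks : List String) : ∀ a, loopFilter fs (some a) ks = true ↔ ((∀ k ∈ ks, ¬ PySem.Str.startswith k fs = true) ∧ List.IsChain (· ≤ ·) (a :: ks)) := by
  induction ks with
  | nil =>
    intro a
    have : loopFilter fs (some a) [] = true := rfl
    rw [this]
    exact ⟨fun _ => ⟨(fun k hk => absurd hk (List.not_mem_nil)), List.IsChain.singleton a⟩, fun _ => rfl⟩
  | cons k ks ih =>
    intro a
    have hred : loopFilter fs (some a) (k :: ks) = if PySem.Str.startswith k fs then false else if a > k then false else loopFilter fs (some k) ks := rfl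
    by_cases hs : PySem.Str.startswith k fs = true
    · rw [hred, if_pos hs]
      simp only [Bool.false_eq_true, false_iff]
      rintro ⟨hc, _⟩
      exact hc k (List.mem_cons_self) hs
    · rw [hred, if_neg hs]
      by_cases h : a > k
      · rw [if_pos h]
        simp only [Bool.false_eq_true, false_iff]
        rintro ⟨_, hch⟩
        exact absurd (List.isChain_cons_cons.mp hch).1 (not_le.mpr h)
      · rw [if_neg h, ih k, List.isChain_cons_cons, List.forall_mem_cons]
        constructor
        · rintro ⟨hc, hch⟩
          exact ⟨⟨hs, hc⟩, not_lt.mp h, hch⟩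
        · rintro ⟨⟨_, hc⟩, _, hch⟩
          exact ⟨hc, hch⟩

theorem loopFilter_iff (fs : String) (ks : List String) : loopFilter fs none ks = true ↔ ((∀ k ∈ ks, ¬ PySem.Str.startswith k fs = true) ∧ List.IsChain (· ≤ ·) ks) := by
  cases ks with
  | nil => exact ⟨fun _ => ⟨(fun k hk => absurd hk (List.not_mem_nil)), List.isChain_nil⟩, fun _ => rfl⟩
  | cons k ks =>
    have hred : loopFilter fs none (k :: ks) = if PySem.Str.startswith k fs then false else if k > k then false else loopFilter fs (some k) ks := rfl
    by_cases hs : PySem.Str.startswith k fs = true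
    · rw [hred, if_pos hs]
      simp only [Bool.false_eq_true, false_iff]
      rintro ⟨hc, _⟩
      exact hc k (List.mem_cons_self) hs
    · rw [hred, if_neg hs, if_neg (lt_irrefl k), loopFilter_some_iff fs ks k, List.forall_mem_cons]
      constructor
      · rintro ⟨hc, hch⟩
        exact ⟨⟨hs, hc⟩, hch⟩
      · rintro ⟨⟨_, hc⟩, hch⟩
        exact ⟨hc, hch⟩

theorem sorted_eq_self_iff (ks : List String) : ks = PySem.List.sorted ks (fun x => x) false ↔ List.IsChain (· ≤ ·) ks := by
  constructor
  · intro h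
    have hp := PySem.List.sorted_pairwise ks (fun x : String => x)
    rw [← h] at hp
    exact hp.isChain
  · intro h
    exact (PySem.List.sorted_eq_self_of_pairwise ks (fun x : String => x) h.pairwise).symm

theorem condNoFilter (ks : List String) : loopNoFilter none ks = true ↔ ks = PySem.List.sorted ks (fun x => x) false := by
  rw [loopNoFilter_iff, sorted_eq_self_iff]

theorem condFilter (fs : String) (ks : List String) : loopFilter fs none ks = true ↔ (ks.all (fun k => !PySem.Str.startswith k fs) = true ∧ ks = PySem.List.sorted ks (fun x => x) false) := by
  rw [loopFilter_iff, sorted_eq_self_iff, List.all_eq_true]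
  simp only [Bool.not_eq_true', Bool.not_eq_true]

-- ===== VERDICT (by name: the statement is the Claim_ definition above) =====
theorem sorted_filtered_spec : Claim_equal_sorted_filtered := by
  intro d fs _
  unfold Spec_sorted_filtered sorted_filtered sorted_filtered_alt
  cases fs with
  | none =>
    by_cases h : (d.map Prod.fst) = PySem.List.sorted (d.map Prod.fst) (fun x => x) false
    · simp only [(condNoFilter _).mpr h, if_pos h, if_true]
    · have h1 : loopNoFilter none (d.map Prod.fst) = false :=
        Bool.eq_false_iff.mpr (fun hc => h ((condNoFilter _).mp hc))
      simp only [h1, if_neg h, Bool.false_eq_true, if_false]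
  | some fs =>
    by_cases he : fs = ""
    · by_cases h : (d.map Prod.fst) = PySem.List.sorted (d.map Prod.fst) (fun x => x) false
      · simp only [he, (condNoFilter _).mpr h, if_pos h, if_true]
      · have h1 : loopNoFilter none (d.map Prod.fst) = false :=
          Bool.eq_false_iff.mpr (fun hc => h ((condNoFilter _).mp hc))
        simp only [he, reduceIte, h1, if_neg h, Bool.false_eq_true, if_false]
    · by_cases h : ((d.map Prod.fst).all (fun k => !PySem.Str.startswith k fs) = true ∧ (d.map Prod.fst) = PySem.List.sorted (d.map Prod.fst) (fun x => x) false)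
      · simp only [if_neg he, (condFilter fs _).mpr h, if_pos h, if_true]
      · have h1 : loopFilter fs none (d.map Prod.fst) = false :=
          Bool.eq_false_iff.mpr (fun hc => h ((condFilter fs _).mp hc))
        simp only [if_neg he, h1, if_neg h, Bool.false_eq_true, if_false]
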